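-- pv_equiv track=rewrite | github.com/graham218/Leet-code.2025---Bill.Graham.Peacemaker- | Python/3-SlidingWindow/Problems/3-Permutation-in-String/Permutation-in-StringPro.py | detect_command_pattern
-- ===== SOURCE A (Python) =====
-- from collections import Counter
--
-- def detect_command_pattern(command, conversation):
--     """
--     Detects predefined command patterns in a conversation by checking if a given command sequence
--     is a permutation of a substring within the conversation history.  This can be useful for
--     identifying specific user intents or detecting misuse of the chatbot.
--
--     Args:
--         command (str): The predefined command pattern to detect.
--         conversation (str): The conversation history.
--
--     Returns:
--         bool: True if the conversation contains a permutation of the command pattern, False otherwise.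
--     """
--     command_map = Counter(command)  # Counter for the predefined command pattern.
--     conversation_map = Counter()  # Counter for the current window in the conversation.
--     left = 0
--     for right in range(len(conversation)):
--         conversation_map[conversation[right]] += 1
--         if right - left + 1 > len(command):
--             conversation_map[conversation[left]] -= 1
--             if conversation_map[conversation[left]] == 0:
--                 del conversation_map[conversation[left]]
--             left += 1
--         if conversation_map == command_map:
--             return True
--     return False
-- ===== SOURCE B (Python) =====
-- def detect_command_pattern(command, conversation):
--     target = sorted(command)
--     k = len(command)
--     return any(sorted(conversation[i:i + k]) == target
--                for i in range(len(conversation) - k + 1))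
-- ===== Notes on version B (the rewrite author's own statement) =====
-- stated objective: alternative
-- what changed: Replaces A's sliding window of character Counters compared at every position by a staged brute-force check: sort the command once, then test each fixed-length window by comparing its sorted characters to the sorted command (no window state carried between positions).
-- intended difference: On the single input where both strings are empty, A returns False because its loop body never runs, while B returns True because the empty command is (trivially) a permutation of the empty substring, which is the intended reading of 'conversation contains a permutation of command'. — e.g. on detect_command_pattern("", ""): A returns false, B returns true
import Mathlib
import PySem

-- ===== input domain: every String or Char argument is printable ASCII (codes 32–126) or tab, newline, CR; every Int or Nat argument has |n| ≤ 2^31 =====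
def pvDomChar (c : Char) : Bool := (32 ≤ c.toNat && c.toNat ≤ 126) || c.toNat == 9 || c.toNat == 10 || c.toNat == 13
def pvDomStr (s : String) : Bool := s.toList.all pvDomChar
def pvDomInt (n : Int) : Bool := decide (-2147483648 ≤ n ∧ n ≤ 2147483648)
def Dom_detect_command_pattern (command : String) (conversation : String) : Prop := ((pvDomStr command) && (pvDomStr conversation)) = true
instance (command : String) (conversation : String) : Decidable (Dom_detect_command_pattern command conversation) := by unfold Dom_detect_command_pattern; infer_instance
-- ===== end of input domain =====

-- B replaces A's sliding window of Counters by a staged brute-force scan: sort the command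
-- once, then compare each fixed-length window's sorted characters with it (objective:
-- alternative — a genuinely different algorithm, not claimed faster).

-- ===== PORT A =====
-- Python's `dict == dict` (order-insensitive): equal size and every item of d found in e.
def pvDictEq (d e : PySem.Dict Char Int) : Bool :=
  d.size == e.size && d.items.all (fun p => e.get? p.1 == some p.2)

-- the `for right in range(len(conversation))` loop of A, with its early `return True`
def pvALoop (cmdMap : PySem.Dict Char Int) (conv : List Char) (k : Nat) :
    List Nat → Nat → PySem.Dict Char Int → Bool
  | [], _, _ => false
  | right :: rest, left, m =>
    let m1 := m.modify (conv.getD right ' ') 0 (· + 1)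
    let st :=
      if (right : Int) - (left : Int) + 1 > (k : Int) then
        let cl := conv.getD left ' '
        let m2 := m1.modify cl 0 (· - 1)
        let m3 := if m2.getD cl 0 == 0 then m2.erase cl else m2
        (m3, left + 1)
      else (m1, left)
    if pvDictEq st.1 cmdMap then true else pvALoop cmdMap conv k rest st.2 st.1

def detect_command_pattern (command : String) (conversation : String) : Bool :=
  let conv := conversation.toList
  pvALoop (PySem.Dict.counter command.toList) conv command.toList.length
    (List.range conv.length) 0 PySem.Dict.empty

-- ===== PORT B =====
-- target = sorted(command); any(sorted(conversation[i:i+k]) == target for i in range(n-k+1))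
def detect_command_pattern_alt (command : String) (conversation : String) : Bool :=
  let cmd := command.toList
  let conv := conversation.toList
  let target := PySem.List.sorted cmd (fun x => x) false
  let k : Int := (cmd.length : Int)
  (PySem.List.pyRange 0 ((conv.length : Int) - k + 1) 1).any
    (fun i => PySem.List.sorted (PySem.List.slice conv (some i) (some (i + k))) (fun x => x) false == target)

-- ===== PRECONDITION & SPEC =====
-- On the single input where both strings are empty, A returns False because its loop body never
-- runs, while B returns True because the empty command is (trivially) a permutation of the empty
-- substring — the intended reading of "conversation contains a permutation of command".
def D_detect_command_pattern (command : String) (conversation : String) : Prop :=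
  command = "" ∧ conversation = ""
instance (command : String) (conversation : String) : Decidable (D_detect_command_pattern command conversation) := by unfold D_detect_command_pattern; infer_instance

def Spec_detect_command_pattern (command : String) (conversation : String) (out : Bool) : Prop := ¬ D_detect_command_pattern command conversation → out = detect_command_pattern_alt command conversation
instance (command : String) (conversation : String) (out : Bool) : Decidable (Spec_detect_command_pattern command conversation out) := by unfold Spec_detect_command_pattern; infer_instance

def pvDiffWitness_detect_command_pattern : String × String := ("", "")
def pvDiffWitnessOut_detect_command_pattern : Bool × Bool := (false, true)

-- ===== CLAIM (what is proved, stated in full; the proofs are below) =====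
def Claim_unchanged_detect_command_pattern : Prop := ∀ (command : String) (conversation : String), Dom_detect_command_pattern command conversation → Spec_detect_command_pattern command conversation (detect_command_pattern command conversation)
def Claim_changed_detect_command_pattern : Prop := Dom_detect_command_pattern (pvDiffWitness_detect_command_pattern.1) (pvDiffWitness_detect_command_pattern.2) ∧ D_detect_command_pattern (pvDiffWitness_detect_command_pattern.1) (pvDiffWitness_detect_command_pattern.2) ∧ detect_command_pattern (pvDiffWitness_detect_command_pattern.1) (pvDiffWitness_detect_command_pattern.2) = pvDiffWitnessOut_detect_command_pattern.1 ∧ detect_command_pattern_alt (pvDiffWitness_detect_command_pattern.1) (pvDiffWitness_detect_command_pattern.2) = pvDiffWitnessOut_detect_command_pattern.2 ∧ pvDiffWitnessOut_detect_command_pattern.1 ≠ pvDiffWitnessOut_detect_command_pattern.2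
def Claim_exact_detect_command_pattern : Prop := ∀ (command : String) (conversation : String), Dom_detect_command_pattern command conversation → D_detect_command_pattern command conversation → detect_command_pattern command conversation ≠ detect_command_pattern_alt command conversation

-- ===== LEMMAS AND PROOFS =====

-- the window conversation[max(0,i-k) : i] A's loop maintains after processing index i-1
def pvWnd (conv : List Char) (k i : Nat) : List Char := (conv.take i).drop (i - k)

-- "the window ending at position i is a permutation of the command"
def pvMatch (cmd conv : List Char) (i : Nat) : Prop :=
  ∀ x : Char, (pvWnd conv cmd.length i).count x = cmd.count x

-- A's conversation_map is exactly the positive-count Counter of the window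
def pvFormA (w : List Char) (m : PySem.Dict Char Int) : Prop :=
  m.keys.Nodup ∧ ∀ x, m.get? x = (if w.count x = 0 then none else some (w.count x : Int))

lemma pvFind?_filter_ne (l : List (Char × Int)) (c x : Char) :
    List.find? (fun p => p.1 == x) (l.filter (fun p => !(p.1 == c))) =
      if x = c then none else List.find? (fun p => p.1 == x) l := by
  induction l with
  | nil => simp
  | cons p t ih =>
    by_cases hpc : p.1 = c
    · by_cases hxc : x = c
      · simp [List.filter_cons, hpc, ih, hxc]
      · have hpx : ¬ p.1 = x := by intro h; exact hxc (by rw [← h, hpc])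
        have hcx : ¬ c = x := fun h => hxc h.symm
        simp [List.filter_cons, hpc, ih, hxc, List.find?_cons, hpx, hcx]
    · by_cases hpx : p.1 = x
      · have hxc : ¬ x = c := by intro h; exact hpc (by rw [hpx, h])
        simp [List.filter_cons, hpc, List.find?_cons, hpx, hxc]
      · simp [List.filter_cons, hpc, List.find?_cons, hpx, ih]

lemma pvErase_get? (d : PySem.Dict Char Int) (c x : Char) :
    (d.erase c).get? x = if x = c then none else d.get? x := by
  show Option.map (fun p => p.2)
      (List.find? (fun p => p.1 == x) (d.items.filter (fun p => !(p.1 == c)))) = _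
  rw [pvFind?_filter_ne]
  by_cases hxc : x = c
  · simp [hxc]
  · simp [hxc, PySem.Dict.get?]

lemma pvErase_keys_nodup (d : PySem.Dict Char Int) (c : Char) (h : d.keys.Nodup) :
    (d.erase c).keys.Nodup := by
  apply List.Nodup.sublist _ h
  exact List.Sublist.map _ List.filter_sublist

lemma pvWnd_succ_lt (conv : List Char) (k i : Nat) (hin : i < conv.length) (hik : i < k) :
    pvWnd conv k (i + 1) = pvWnd conv k i ++ [conv.getD i ' '] := by
  have h1 : i + 1 - k = 0 := by omega
  have h2 : i - k = 0 := by omega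
  have h3 : conv.getD i ' ' = conv[i] := by
    simp [List.getD_eq_getElem?_getD, List.getElem?_eq_getElem hin]
  rw [pvWnd, pvWnd, h1, h2, List.drop_zero, List.drop_zero, h3, List.take_add_one,
    List.getElem?_eq_getElem hin]
  rfl

lemma pvWnd_succ_ge (conv : List Char) (k i : Nat) (hin : i < conv.length) (hik : k ≤ i) :
    pvWnd conv k i ++ [conv.getD i ' '] = conv.getD (i - k) ' ' :: pvWnd conv k (i + 1) := by
  have h3 : conv.getD i ' ' = conv[i] := by
    simp [List.getD_eq_getElem?_getD, List.getElem?_eq_getElem hin]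
  have hik' : i - k < conv.length := by omega
  have h4 : conv.getD (i - k) ' ' = conv[i - k] := by
    simp [List.getD_eq_getElem?_getD, List.getElem?_eq_getElem hik']
  have hlen : (conv.take i).length = i := by simp; omega
  rcases Nat.eq_zero_or_pos k with hk | hk
  · subst hk
    have : pvWnd conv 0 i = [] := by simp [pvWnd]
    have h5 : pvWnd conv 0 (i+1) = [] := by simp [pvWnd]
    simp [this, h5, h3, h4, Nat.sub_zero]
  · have h6 : conv.take (i+1) = conv.take i ++ [conv[i]] := by
      rw [List.take_add_one, List.getElem?_eq_getElem hin]; rfl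
    have h7 : pvWnd conv k (i+1) = (conv.take i).drop (i + 1 - k) ++ [conv[i]] := by
      rw [pvWnd, h6, List.drop_append_of_le_length (by omega)]
    have h8 : (conv.take i).drop (i - k) = conv[i - k] :: (conv.take i).drop (i - k + 1) := by
      rw [List.drop_eq_getElem_cons (by omega)]
      congr 1
      rw [List.getElem_take]
    rw [pvWnd, h7, h8, h3, h4]
    have : i - k + 1 = i + 1 - k := by omega
    rw [this]; simp

lemma pvWnd_length (conv : List Char) (k i : Nat) (h : i ≤ conv.length) :
    (pvWnd conv k i).length = i - (i - k) := by
  simp [pvWnd]; omega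

lemma pvCounter_get? (cmd : List Char) (x : Char) :
    (PySem.Dict.counter cmd).get? x =
      (if cmd.count x = 0 then none else some (cmd.count x : Int)) := by
  have hc : (PySem.Dict.counter cmd).contains x = true ↔ x ∈ cmd := by
    rw [PySem.Dict.contains_iff_mem_keys, PySem.Dict.keys_counter]
    exact PySem.Set.mem_ofList cmd x
  have hg : (PySem.Dict.counter cmd).getD x 0 = cmd.count x := PySem.Dict.getD_counter cmd x
  by_cases hm : x ∈ cmd
  · have hcnt : cmd.count x ≠ 0 := by have := List.count_pos_iff.mpr hm; omega
    have : (PySem.Dict.counter cmd).contains x = true := hc.mpr hm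
    rw [PySem.Dict.contains_eq_isSome_get?] at this
    obtain ⟨v, hv⟩ := Option.isSome_iff_exists.mp this
    have := PySem.Dict.getD_of_get?_eq_some (PySem.Dict.counter cmd) 0 hv
    rw [hg] at this
    simp [hv, hcnt, ← this]
  · have hcnt : cmd.count x = 0 := by simp [List.count_eq_zero]; exact hm
    have : (PySem.Dict.counter cmd).contains x = false := by
      cases h : (PySem.Dict.counter cmd).contains x
      · rfl
      · exact absurd (hc.mp h) hm
    rw [PySem.Dict.contains_eq_isSome_get?] at this
    simp [hcnt]
    exact Option.not_isSome_iff_eq_none.mp (by simp [this])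

lemma pvDictEq_iff (d e : PySem.Dict Char Int) (hd : d.keys.Nodup) (he : e.keys.Nodup) :
    pvDictEq d e = true ↔ ∀ x, d.get? x = e.get? x := by
  constructor
  · rintro h
    rw [pvDictEq, Bool.and_eq_true] at h
    obtain ⟨hsz, hall⟩ := h
    rw [beq_iff_eq] at hsz
    rw [List.all_eq_true] at hall
    have hsub : ∀ kk ∈ d.keys, kk ∈ e.keys := by
      intro kk hkk
      obtain ⟨⟨k1, v⟩, hmem, hk1⟩ := List.mem_map.mp hkk
      have := hall _ hmem
      rw [beq_iff_eq] at this
      have : e.get? kk = some v := by subst hk1; exact this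
      have : e.contains kk = true := by
        rw [PySem.Dict.contains_eq_isSome_get?, this]; rfl
      exact (PySem.Dict.contains_iff_mem_keys e kk).mp this
    have hset : d.keys.toFinset = e.keys.toFinset := by
      apply Finset.eq_of_subset_of_card_le
      · intro a ha
        simp only [List.mem_toFinset] at ha ⊢
        exact hsub a ha
      · rw [List.toFinset_card_of_nodup hd, List.toFinset_card_of_nodup he]
        have : d.keys.length = e.keys.length := by
          simp only [PySem.Dict.keys, List.length_map]
          exact hsz
        omega
    intro x
    cases hx : d.get? x with
    | none =>
      have hxk : x ∉ d.keys := (PySem.Dict.get?_eq_none_iff_not_mem_keys d x).mp hx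
      have hxe : x ∉ e.keys := by
        intro hxe
        apply hxk
        have : x ∈ e.keys.toFinset := List.mem_toFinset.mpr hxe
        rw [← hset] at this
        exact List.mem_toFinset.mp this
      exact ((PySem.Dict.get?_eq_none_iff_not_mem_keys e x).mpr hxe).symm
    | some v =>
      have := PySem.Dict.mem_items_of_get?_eq_some d hx
      have := hall _ this
      rw [beq_iff_eq] at this
      exact this.symm
  · intro h
    rw [pvDictEq, Bool.and_eq_true, beq_iff_eq, List.all_eq_true]
    constructor
    · have hset : d.keys.toFinset = e.keys.toFinset := by
        apply Finset.ext
        intro a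
        simp only [List.mem_toFinset]
        constructor
        · intro ha
          by_contra hna
          have h1 := (PySem.Dict.get?_eq_none_iff_not_mem_keys e a).mpr hna
          have h2 := (PySem.Dict.get?_eq_none_iff_not_mem_keys d a).mp ((h a).trans h1)
          exact h2 ha
        · intro ha
          by_contra hna
          have h1 := (PySem.Dict.get?_eq_none_iff_not_mem_keys d a).mpr hna
          have h2 := (PySem.Dict.get?_eq_none_iff_not_mem_keys e a).mp ((h a).symm.trans h1)
          exact h2 ha
      have : d.keys.length = e.keys.length := by
        rw [← List.toFinset_card_of_nodup hd, ← List.toFinset_card_of_nodup he, hset]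
      simpa [PySem.Dict.size, PySem.Dict.keys] using this
    · rintro ⟨k1, v⟩ hmem
      have hg := PySem.Dict.get?_of_mem_items d hmem hd
      rw [beq_iff_eq]
      exact ((h k1).symm.trans hg)

lemma pvFormA_getD (w : List Char) (m : PySem.Dict Char Int) (hm : pvFormA w m) (x : Char) :
    m.getD x 0 = (w.count x : Int) := by
  rw [PySem.Dict.getD_eq_get?_getD, hm.2 x]
  by_cases h : w.count x = 0 <;> simp [h]

lemma pvFormA_add (w : List Char) (m : PySem.Dict Char Int) (a : Char) (hm : pvFormA w m) :
    pvFormA (w ++ [a]) (m.modify a 0 (· + 1)) := by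
  rw [PySem.Dict.modify, pvFormA_getD w m hm a]
  refine ⟨PySem.Dict.nodup_keys_insert _ _ _ hm.1, fun x => ?_⟩
  rw [show (m.insert a ((w.count a : Int) + 1)).get? x
      = if x = a then some ((w.count a : Int) + 1) else m.get? x from
    PySem.Dict.get?_insert m a x _]
  by_cases hxa : x = a
  · subst hxa
    have : (w ++ [x]).count x = w.count x + 1 := by simp
    simp [this]
  · have hz : List.count x [a] = 0 := by rw [List.count_eq_zero]; simp [hxa]
    have : (w ++ [a]).count x = w.count x := by rw [List.count_append, hz]; omega
    simp [this, hxa, hm.2 x]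

lemma pvFormA_remove (w : List Char) (m : PySem.Dict Char Int) (b : Char) (hb : b ∈ w)
    (hm : pvFormA w m) :
    pvFormA (w.erase b)
      (if (m.modify b 0 (· - 1)).getD b 0 == 0 then (m.modify b 0 (· - 1)).erase b
       else m.modify b 0 (· - 1)) := by
  have hcb : 0 < w.count b := List.count_pos_iff.mpr hb
  have hm2 : m.modify b 0 (· - 1) = m.insert b ((w.count b : Int) - 1) := by
    rw [PySem.Dict.modify, pvFormA_getD w m hm b]
  have hg2 : ∀ x, (m.modify b 0 (· - 1)).get? x =
      if x = b then some ((w.count b : Int) - 1) else m.get? x := by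
    intro x; rw [hm2]; exact PySem.Dict.get?_insert m b x _
  have hgd2 : (m.modify b 0 (· - 1)).getD b 0 = (w.count b : Int) - 1 := by
    rw [PySem.Dict.getD_eq_get?_getD, hg2 b]; simp
  have hnd2 : (m.modify b 0 (· - 1)).keys.Nodup := by
    rw [hm2]; exact PySem.Dict.nodup_keys_insert _ _ _ hm.1
  have hcount : ∀ x, (w.erase b).count x = if x = b then w.count b - 1 else w.count x := by
    intro x
    by_cases hxb : x = b
    · subst hxb; simp [List.count_erase_self]
    · rw [if_neg hxb, List.count_erase_of_ne hxb]
  by_cases h1 : w.count b = 1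
  · have : ((m.modify b 0 (· - 1)).getD b 0 == 0) = true := by
      rw [hgd2, h1]; simp
    rw [if_pos this]
    refine ⟨pvErase_keys_nodup _ _ hnd2, fun x => ?_⟩
    rw [pvErase_get?, hg2 x, hcount x]
    by_cases hxb : x = b
    · simp [hxb, h1]
    · simp only [if_neg hxb, hm.2 x]
  · have : ((m.modify b 0 (· - 1)).getD b 0 == 0) = false := by
      rw [hgd2, beq_eq_false_iff_ne]
      intro hh
      have : (w.count b : Int) = 1 := by omega
      exact h1 (by exact_mod_cast this)
    rw [if_neg (ne_true_of_eq_false this)]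
    refine ⟨hnd2, fun x => ?_⟩
    rw [hg2 x, hcount x]
    by_cases hxb : x = b
    · have h2 : ¬ (w.count b - 1 = 0) := by omega
      have h3 : ((w.count b - 1 : Nat) : Int) = (w.count b : Int) - 1 := by push_cast [hcb]; ring
      simp [hxb, h2, h3]
    · simp only [if_neg hxb, hm.2 x]

lemma pvFormA_dictEq (w cmd : List Char) (m : PySem.Dict Char Int) (hm : pvFormA w m) :
    (pvDictEq m (PySem.Dict.counter cmd) = true) ↔ ∀ x, w.count x = cmd.count x := by
  rw [pvDictEq_iff m _ hm.1 (PySem.Dict.nodup_keys_counter cmd)]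
  constructor
  · intro h x
    have := (hm.2 x).symm.trans ((h x).trans (pvCounter_get? cmd x))
    by_cases h1 : w.count x = 0 <;> by_cases h2 : cmd.count x = 0 <;>
      simp [h1, h2] at this ⊢ <;> omega
  · intro h x
    rw [hm.2 x, pvCounter_get? cmd x, h x]

lemma pvMatch_le (cmd conv : List Char) (i : Nat) (h : i ≤ conv.length)
    (hm : pvMatch cmd conv i) : cmd.length ≤ i := by
  have hperm : (pvWnd conv cmd.length i).Perm cmd := List.perm_iff_count.mpr (fun a => hm a)
  have hlen := hperm.length_eq
  rw [pvWnd_length conv cmd.length i h] at hlen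
  omega

lemma pvALoop_iff (cmd conv : List Char) (j i : Nat) (m : PySem.Dict Char Int)
    (hij : i + j ≤ conv.length) (hm : pvFormA (pvWnd conv cmd.length i) m) :
    pvALoop (PySem.Dict.counter cmd) conv cmd.length (List.range' i j) (i - cmd.length) m = true ↔
      ∃ r, i ≤ r ∧ r < i + j ∧ pvMatch cmd conv (r + 1) := by
  induction j generalizing i m with
  | zero =>
    simp only [List.range', pvALoop]
    constructor
    · intro h; cases h
    · rintro ⟨r, h1, h2, _⟩; omega
  | succ j ih =>
    have hin : i < conv.length := by omega
    rw [List.range'_succ]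
    set k := cmd.length with hk
    set a := conv.getD i ' ' with ha
    have key : ∃ m' : PySem.Dict Char Int,
        pvALoop (PySem.Dict.counter cmd) conv k (i :: List.range' (i+1) j) (i - k) m
          = (if pvDictEq m' (PySem.Dict.counter cmd) then true
             else pvALoop (PySem.Dict.counter cmd) conv k (List.range' (i+1) j) ((i+1) - k) m')
        ∧ pvFormA (pvWnd conv k (i+1)) m' := by
      by_cases hki : k ≤ i
      · have hcond : ((i : Int) - ((i - k : Nat) : Int) + 1 > (k : Int)) := by omega
        set b := conv.getD (i - k) ' ' with hb
        set m1 := m.modify a 0 (· + 1) with hm1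
        set m3 := (if (m1.modify b 0 (· - 1)).getD b 0 == 0
            then (m1.modify b 0 (· - 1)).erase b else m1.modify b 0 (· - 1)) with hm3
        refine ⟨m3, ?_, ?_⟩
        · show pvALoop _ _ _ _ _ _ = _
          rw [pvALoop]
          simp only [if_pos hcond]
          have : i - k + 1 = (i + 1) - k := by omega
          rw [this]
        · have h1 : pvFormA (pvWnd conv k i ++ [a]) m1 := pvFormA_add _ _ _ hm
          have hseq := pvWnd_succ_ge conv k i hin hki
          have hbmem : b ∈ pvWnd conv k i ++ [a] := by rw [hseq]; exact List.mem_cons_self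
          have h2 := pvFormA_remove _ _ _ hbmem h1
          rw [hseq, List.erase_cons_head] at h2
          exact h2
      · have hik : i < k := by omega
        have hiz : i - k = 0 := by omega
        have hiz' : (i + 1) - k = 0 := by omega
        have hcond : ¬ ((i : Int) - ((i - k : Nat) : Int) + 1 > (k : Int)) := by
          rw [hiz]; push_cast; omega
        refine ⟨m.modify a 0 (· + 1), ?_, ?_⟩
        · show pvALoop _ _ _ _ _ _ = _
          rw [pvALoop]
          simp only [if_neg hcond]
          rw [hiz, hiz']
        · rw [pvWnd_succ_lt conv k i hin hik]
          exact pvFormA_add _ _ _ hm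
    obtain ⟨m', hstep, hm'⟩ := key
    rw [hstep]
    have hdec := pvFormA_dictEq (pvWnd conv k (i+1)) cmd m' hm'
    by_cases hEq : pvDictEq m' (PySem.Dict.counter cmd) = true
    · rw [if_pos hEq]
      constructor
      · intro _; exact ⟨i, le_refl i, by omega, hdec.mp hEq⟩
      · intro _; rfl
    · have hnm : ¬ pvMatch cmd conv (i + 1) := fun h => hEq (hdec.mpr h)
      rw [if_neg hEq]
      rw [ih (i+1) m' (by omega) hm']
      constructor
      · rintro ⟨r, h1, h2, h3⟩; exact ⟨r, by omega, by omega, h3⟩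
      · rintro ⟨r, h1, h2, h3⟩
        rcases Nat.eq_or_lt_of_le h1 with rfl | hlt
        · exact absurd h3 hnm
        · exact ⟨r, by omega, by omega, h3⟩

-- B = true iff some length-k window starting at j is a permutation of the command
lemma pvB_iff (cmd conv : List Char) :
    ((PySem.List.pyRange 0 ((conv.length : Int) - (cmd.length : Int) + 1) 1).any
      (fun i => PySem.List.sorted (PySem.List.slice conv (some i) (some (i + (cmd.length : Int)))) (fun x => x) false
        == PySem.List.sorted cmd (fun x => x) false) = true)
    ↔ ∃ j : Nat, j + cmd.length ≤ conv.length ∧ ((conv.drop j).take cmd.length).Perm cmd := by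
  rw [List.any_eq_true]
  constructor
  · rintro ⟨i, hmem, hp⟩
    rw [PySem.List.mem_pyRange_one] at hmem
    obtain ⟨h0, h1⟩ := hmem
    refine ⟨i.toNat, by omega, ?_⟩
    have hi : ((i.toNat : Nat) : Int) = i := Int.toNat_of_nonneg h0
    rw [← hi, PySem.List.slice_natCast_add, beq_iff_eq,
      PySem.List.sorted_id_eq_sorted_id_iff_perm] at hp
    exact hp
  · rintro ⟨j, hj, hperm⟩
    refine ⟨(j : Int), ?_, ?_⟩
    · rw [PySem.List.mem_pyRange_one]
      constructor <;> [positivity; omega]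
    · rw [PySem.List.slice_natCast_add, beq_iff_eq,
        PySem.List.sorted_id_eq_sorted_id_iff_perm]
      exact hperm

-- the two existential characterisations agree away from the double-empty input
lemma pvExists_iff (cmd conv : List Char) (h : cmd ≠ [] ∨ conv ≠ []) :
    (∃ r, r < conv.length ∧ pvMatch cmd conv (r + 1)) ↔
    (∃ j : Nat, j + cmd.length ≤ conv.length ∧ ((conv.drop j).take cmd.length).Perm cmd) := by
  constructor
  · rintro ⟨r, hr, hm⟩
    have hk := pvMatch_le cmd conv (r + 1) (by omega) hm
    refine ⟨r + 1 - cmd.length, by omega, ?_⟩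
    have hwin : pvWnd conv cmd.length (r + 1)
        = (conv.drop (r + 1 - cmd.length)).take cmd.length := by
      rw [pvWnd, List.drop_take]
      congr 1
      omega
    exact List.perm_iff_count.mpr (fun a => by rw [← hwin]; exact hm a)
  · rintro ⟨j, hj, hperm⟩
    by_cases hk : cmd.length = 0
    · have hcmd : cmd = [] := List.length_eq_zero_iff.mp hk
      have hn : conv ≠ [] := by
        rcases h with h | h
        · exact absurd hcmd h
        · exact h
      refine ⟨0, by cases conv with | nil => exact absurd rfl hn | cons a t => simp, ?_⟩
      intro x
      rw [pvWnd, hcmd]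
      simp
    · refine ⟨j + cmd.length - 1, by omega, ?_⟩
      have hm1 : j + cmd.length - 1 + 1 = j + cmd.length := by omega
      intro x
      rw [hm1, pvWnd, List.drop_take]
      have h3 : j + cmd.length - cmd.length = j := by omega
      have h2 : j + cmd.length - j = cmd.length := by omega
      rw [h3, h2]
      exact List.perm_iff_count.mp hperm x

theorem pvMain (cmd conv : List Char) (h : cmd ≠ [] ∨ conv ≠ []) :
    pvALoop (PySem.Dict.counter cmd) conv cmd.length (List.range conv.length) 0 PySem.Dict.empty =
    ((PySem.List.pyRange 0 ((conv.length : Int) - (cmd.length : Int) + 1) 1).any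
      (fun i => PySem.List.sorted (PySem.List.slice conv (some i) (some (i + (cmd.length : Int)))) (fun x => x) false
        == PySem.List.sorted cmd (fun x => x) false)) := by
  have hformA : pvFormA (pvWnd conv cmd.length 0) PySem.Dict.empty := by
    refine ⟨PySem.Dict.nodup_keys_empty, fun x => ?_⟩
    rw [pvWnd]
    simp [PySem.Dict.get?_empty]
  have hA0 := pvALoop_iff cmd conv conv.length 0 PySem.Dict.empty (by omega) hformA
  rw [Nat.zero_sub, ← List.range_eq_range'] at hA0
  have hA : pvALoop (PySem.Dict.counter cmd) conv cmd.length (List.range conv.length) 0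
      PySem.Dict.empty = true ↔ ∃ r, r < conv.length ∧ pvMatch cmd conv (r + 1) := by
    rw [hA0]
    constructor
    · rintro ⟨r, _, h2, h3⟩; exact ⟨r, by omega, h3⟩
    · rintro ⟨r, h2, h3⟩; exact ⟨r, by omega, by omega, h3⟩
  have hiff := hA.trans ((pvExists_iff cmd conv h).trans (pvB_iff cmd conv).symm)
  cases hx : pvALoop (PySem.Dict.counter cmd) conv cmd.length (List.range conv.length) 0
      PySem.Dict.empty with
  | true => exact (hiff.mp hx).symm
  | false =>
    cases hy : ((PySem.List.pyRange 0 ((conv.length : Int) - (cmd.length : Int) + 1) 1).any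
      (fun i => PySem.List.sorted (PySem.List.slice conv (some i) (some (i + (cmd.length : Int)))) (fun x => x) false
        == PySem.List.sorted cmd (fun x => x) false)) with
    | false => rfl
    | true => rw [hiff.mpr hy] at hx; cases hx

theorem detect_command_pattern_eq (command conversation : String)
    (h : ¬ (command = "" ∧ conversation = "")) :
    detect_command_pattern command conversation = detect_command_pattern_alt command conversation := by
  simp only [detect_command_pattern, detect_command_pattern_alt]
  apply pvMain
  by_cases hc : command = ""
  · right
    intro hv
    exact h ⟨hc, String.toList_eq_nil_iff.mp hv⟩
  · left
    intro hv
    exact hc (String.toList_eq_nil_iff.mp hv)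

-- ===== VERDICT (by name: the statement is the Claim_ definition above) =====
theorem detect_command_pattern_spec : Claim_unchanged_detect_command_pattern := by
  intro command conversation _ hnd
  exact detect_command_pattern_eq command conversation hnd

theorem detect_command_pattern_changed : Claim_changed_detect_command_pattern := by
  unfold Claim_changed_detect_command_pattern; decide

theorem detect_command_pattern_tight : Claim_exact_detect_command_pattern := by
  intro command conversation _ hD
  obtain ⟨h1, h2⟩ := hD
  subst h1; subst h2
  decide
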